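-- pv_equiv track=rewrite | github.com/momomoro/brawl_result_submission | brawl/result_submission/common.py | generate_decks
-- ===== SOURCE A (Python) =====
-- def generate_decks(sheet):
--     decks = {}
--     players = sheet[0]
--     commanders = sheet[3]
--     players = list(filter(None, players))
--     deck_number = 0
--     for player in players:
--         decks[player] = []
--         for commander in commanders[deck_number:]:
--             deck_number += 1
--             decks[player].append(commander)
--             if deck_number % 4 == 0:
--                 break
--     return decks
-- ===== SOURCE B (Python) =====
-- def generate_decks(sheet):
--     players = [p for p in sheet[0] if p]
--     commanders = sheet[3]
--     return {player: list(commanders[4 * i:4 * i + 4]) for i, player in enumerate(players)}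
-- ===== Notes on version B (the rewrite author's own statement) =====
-- stated objective: simpler
-- what changed: Replaces A's running deck_number counter with its modular-break inner loop by a single dict comprehension that gives player i the slice commanders[4*i:4*i+4].
import Mathlib
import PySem

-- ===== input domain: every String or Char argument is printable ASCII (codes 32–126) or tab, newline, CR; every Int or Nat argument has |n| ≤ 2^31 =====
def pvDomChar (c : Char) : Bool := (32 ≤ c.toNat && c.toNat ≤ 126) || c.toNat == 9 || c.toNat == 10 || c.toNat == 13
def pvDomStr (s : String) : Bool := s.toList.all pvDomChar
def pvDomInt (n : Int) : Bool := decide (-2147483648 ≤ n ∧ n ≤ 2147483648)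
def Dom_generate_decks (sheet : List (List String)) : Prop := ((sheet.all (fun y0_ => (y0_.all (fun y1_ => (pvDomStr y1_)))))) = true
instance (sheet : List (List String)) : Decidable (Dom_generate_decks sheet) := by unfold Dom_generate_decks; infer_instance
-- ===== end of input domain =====

-- B replaces A's running deck_number counter and modular-break inner loop by a dict
-- comprehension giving player i the slice commanders[4*i:4*i+4] (objective: simpler).


-- ===== PORT A =====
-- inner loop: `for commander in commanders[deck_number:]: deck_number += 1;
-- decks[player].append(commander); if deck_number % 4 == 0: break` — state (decks, deck_number);
-- the append is decks[player] = decks.get(player) ++ [c], i.e. Dict.modify.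
def innerA (player : String) : List String → PySem.Dict String (List String) → Nat →
    PySem.Dict String (List String) × Nat
  | [], decks, dn => (decks, dn)
  | c :: rest, decks, dn =>
    let dn' := dn + 1
    let decks' := PySem.Dict.modify decks player [] (fun l => l ++ [c])
    if dn' % 4 == 0 then (decks', dn') else innerA player rest decks' dn'

-- outer loop over players; deck_number is a Nat (it starts at 0 and only grows, so
-- commanders[deck_number:] is exactly List.drop deck_number).
def outerA (commanders : List String) : List String → PySem.Dict String (List String) → Nat →
    PySem.Dict String (List String)
  | [], decks, _ => decks
  | p :: rest, decks, dn =>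
    let decks1 := decks.insert p []
    let r := innerA p (commanders.drop dn) decks1 dn
    outerA commanders rest r.1 r.2

def generate_decks (sheet : List (List String)) : List (String × List String) :=
  let players := (PySem.List.pyGet? sheet 0).getD []     -- in range under Pre_
  let commanders := (PySem.List.pyGet? sheet 3).getD []  -- in range under Pre_
  let players := players.filter (fun p => p ≠ "")        -- filter(None, players): keep non-empty strings
  (outerA commanders players PySem.Dict.empty 0).items

-- ===== PORT B =====
def generate_decks_alt (sheet : List (List String)) : List (String × List String) :=
  let players := ((PySem.List.pyGet? sheet 0).getD []).filter (fun p => p ≠ "")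
  let commanders := (PySem.List.pyGet? sheet 3).getD []
  ((PySem.List.enumerate players 0).foldl
    (fun d pi => d.insert pi.2 (PySem.List.slice commanders (some (4 * pi.1)) (some (4 * pi.1 + 4))))
    PySem.Dict.empty).items

-- ===== PRECONDITION & SPEC =====
-- Pre_ excludes sheets with fewer than 4 rows, on which A raises IndexError at sheet[0]/sheet[3].
def Pre_generate_decks (sheet : List (List String)) : Prop := 4 ≤ sheet.length
instance (sheet : List (List String)) : Decidable (Pre_generate_decks sheet) := by
  unfold Pre_generate_decks; infer_instance
def pvWitness_generate_decks : List (List String) :=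
  [["alice", "", "bob"], [], [], ["c1", "c2", "c3", "c4", "c5"]]
def Spec_generate_decks (sheet : List (List String)) (out : List (String × List String)) : Prop := out = generate_decks_alt sheet
instance (sheet : List (List String)) (out : List (String × List String)) : Decidable (Spec_generate_decks sheet out) := by unfold Spec_generate_decks; infer_instance

-- ===== CLAIM (what is proved, stated in full; the proofs are below) =====
def Claim_equal_generate_decks : Prop := ∀ (sheet : List (List String)), Dom_generate_decks sheet → Pre_generate_decks sheet → Spec_generate_decks sheet (generate_decks sheet)

-- ===== LEMMAS AND PROOFS =====

theorem contains_false_key_ne {d : PySem.Dict String (List String)} {p : String}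
    (h : d.contains p = false) : ∀ q ∈ d.items, (q.1 == p) = false := by
  intro q hq
  by_contra hne
  have hqp : q.1 = p := by
    cases hbe : q.1 == p with
    | true => exact eq_of_beq hbe
    | false => exact absurd hbe hne
  have hq2 : (p, q.2) ∈ d.items := by rw [← hqp]; simpa using hq
  have : d.contains p = true := by
    rw [PySem.Dict.contains_iff_mem_keys]
    exact PySem.Dict.mem_keys_of_mem_items d hq2
  simp [this] at h

theorem insert_insert_self (d : PySem.Dict String (List String)) (p : String)
    (v w : List String) : (d.insert p v).insert p w = d.insert p w := by
  by_cases hc : d.contains p = true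
  · simp only [PySem.Dict.insert, hc, if_true]
    have hc2 : PySem.Dict.contains
        (PySem.Dict.mk (List.map (fun q => if (q.1 == p) = true then (p, v) else q) d.items)) p = true := by
      have := PySem.Dict.contains_insert_self (d := d) (k := p) (v := v)
      simpa [PySem.Dict.insert, hc] using this
    simp only [hc2, if_true, List.map_map]
    congr 1
    apply List.map_congr_left
    intro q _
    by_cases hq : q.1 = p <;> simp [hq]
  · have hcf : d.contains p = false := by simpa using hc
    simp only [PySem.Dict.insert, hcf, Bool.false_eq_true, if_false]
    have hc2 : PySem.Dict.contains (PySem.Dict.mk (d.items ++ [(p, v)])) p = true := by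
      have := PySem.Dict.contains_insert_self (d := d) (k := p) (v := v)
      simpa [PySem.Dict.insert, hcf] using this
    simp only [hc2, if_true, List.map_append]
    have h1 : List.map (fun q => if (q.1 == p) = true then (p, w) else q) d.items
        = List.map id d.items := by
      apply List.map_congr_left
      intro q hq
      simp [contains_false_key_ne hcf q hq]
    rw [h1, List.map_id]
    simp

theorem modify_insert_self (d : PySem.Dict String (List String)) (p : String)
    (v : List String) (f : List String → List String) :
    PySem.Dict.modify (d.insert p v) p [] f = d.insert p (f v) := by
  simp only [PySem.Dict.modify, PySem.Dict.getD_insert_self, insert_insert_self]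

theorem innerA_insert (p : String) : ∀ (cs : List String)
    (d : PySem.Dict String (List String)) (v : List String) (dn : Nat),
    innerA p cs (d.insert p v) dn =
      (d.insert p (v ++ cs.take (4 - dn % 4)), dn + min (4 - dn % 4) cs.length) := by
  intro cs
  induction cs with
  | nil => intro d v dn; simp [innerA]
  | cons c rest ih =>
    intro d v dn
    rw [innerA]
    simp only [modify_insert_self]
    by_cases h4 : (dn + 1) % 4 = 0
    · have hdn : dn % 4 = 3 := by omega
      simp [h4, hdn]
    · have hne : ((dn + 1) % 4 == 0) = false := by simpa using h4
      rw [hne]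
      simp only [Bool.false_eq_true, if_false]
      rw [ih]
      have h1 : 4 - dn % 4 = (4 - (dn + 1) % 4) + 1 := by omega
      simp only [Prod.mk.injEq]
      refine ⟨?_, ?_⟩
      · rw [h1, List.take_succ_cons, List.append_assoc]
        simp
      · simp only [List.length_cons]; omega

theorem outerA_eq (commanders : List String) : ∀ (ps : List String)
    (d : PySem.Dict String (List String)) (dn i : Nat),
    commanders.drop dn = commanders.drop (4 * i) →
    (dn % 4 = 0 ∨ commanders.length ≤ dn) →
    outerA commanders ps d dn =
      (PySem.List.enumerate ps (i : Int)).foldl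
        (fun d pi => d.insert pi.2 (PySem.List.slice commanders (some (4 * pi.1)) (some (4 * pi.1 + 4)))) d := by
  intro ps
  induction ps with
  | nil => intro d dn i _ _; simp [outerA, PySem.List.enumerate_nil]
  | cons p rest ih =>
    intro d dn i hdrop hmod
    rw [outerA, PySem.List.enumerate_cons, List.foldl_cons]
    have hslice : PySem.List.slice commanders (some (4 * (i : Int))) (some (4 * (i : Int) + 4))
        = (commanders.drop (4 * i)).take 4 := by
      have : (4 * (i : Int)) = ((4 * i : Nat) : Int) := by push_cast; ring
      rw [this]
      have h2 : ((4 * i : Nat) : Int) + 4 = (((4 * i + 4) : Nat) : Int) := by push_cast; ring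
      rw [h2, PySem.List.slice_natCast]
      congr 1
      omega
    -- the inner loop takes the next block
    have hinner := innerA_insert p (commanders.drop dn) d [] dn
    by_cases hnil : commanders.drop dn = []
    · -- commanders exhausted: empty chunk, dn unchanged
      rw [hinner]
      simp only [hnil, List.take_nil, List.append_nil, List.length_nil, Nat.min_zero, Nat.add_zero]
      rw [hslice, ← hdrop, hnil]
      simp only [List.take_nil]
      apply ih _ _ (i + 1)
      · rw [hnil]
        have hlen : commanders.length ≤ dn := by
          have := List.drop_eq_nil_iff.mp hnil; omega
        symm
        rw [List.drop_eq_nil_iff]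
        have h4i : commanders.length ≤ 4 * i := by
          have := List.drop_eq_nil_iff.mp (hdrop ▸ hnil); omega
        omega
      · right
        have := List.drop_eq_nil_iff.mp hnil; omega
    · have hlt : dn < commanders.length := by
        by_contra hge
        exact hnil (List.drop_eq_nil_iff.mpr (by omega))
      have hm0 : dn % 4 = 0 := by
        rcases hmod with h | h
        · exact h
        · omega
      rw [hinner, hm0]
      simp only [Nat.sub_zero]
      have hleneq : (commanders.drop dn).length = (commanders.drop (4 * i)).length := by
        rw [hdrop]
      have hdn4i : dn = 4 * i := by
        simp only [List.length_drop] at hleneq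
        have h4ilt : 4 * i < commanders.length := by
          by_contra hge
          have : commanders.drop (4 * i) = [] := List.drop_eq_nil_iff.mpr (by omega)
          exact hnil (hdrop.trans this)
        omega
      rw [hslice, ← hdrop, List.nil_append]
      apply ih _ _ (i + 1)
      · -- drop after the chunk = drop (4*(i+1))
        have h2 : commanders.drop (dn + min 4 (commanders.drop dn).length)
            = (commanders.drop dn).drop (min 4 (commanders.drop dn).length) := by
          rw [List.drop_drop]
        rw [h2]
        by_cases hbig : 4 ≤ (commanders.drop dn).length
        · have hmin : min 4 (commanders.drop dn).length = 4 := by omega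
          rw [hmin, hdrop, List.drop_drop]
          congr 1
        · have hmin : min 4 (commanders.drop dn).length = (commanders.drop dn).length := by omega
          rw [hmin, List.drop_length]
          symm
          rw [List.drop_eq_nil_iff]
          simp only [List.length_drop] at hbig ⊢
          omega
      · by_cases hbig : 4 ≤ (commanders.drop dn).length
        · left; omega
        · right
          simp only [List.length_drop] at hbig ⊢
          omega

-- ===== VERDICT (by name: the statement is the Claim_ definition above) =====
theorem generate_decks_spec : Claim_equal_generate_decks := by
  intro sheet _ _
  unfold Spec_generate_decks generate_decks generate_decks_alt
  have := outerA_eq ((PySem.List.pyGet? sheet 3).getD [])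
    (((PySem.List.pyGet? sheet 0).getD []).filter (fun p => p ≠ ""))
    PySem.Dict.empty 0 0 (by norm_num) (by norm_num)
  simp only [Nat.cast_zero] at this
  exact congrArg PySem.Dict.items this
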